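-- pv_equiv track=rewrite | github.com/yu7400ki/atcoder.jp | atcoder.jp/Python (CPython 3.11.4)/arc166/arc166_a.py | solve
-- ===== SOURCE A (Python) =====
-- def solve(N: int, X: str, Y: str):
--     for x, y in zip(X, Y):
--         if y == "C" and x != "C":
--             return "No"
--     XC = []
--     YC = []
--     tmp_x = []
--     tmp_y = []
--     for x, y in zip(X, Y):
--         if y == "C":
--             if tmp_y:
--                 XC.append(tmp_x)
--                 YC.append(tmp_y)
--                 tmp_x = []
--                 tmp_y = []
--         else:
--             tmp_x.append(x)
--             tmp_y.append(y)
--     if tmp_y: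
--         XC.append(tmp_x)
--         YC.append(tmp_y)
--     if all(solve2(x, y) for x, y in zip(XC, YC)):
--         return "Yes"
--     else:
--         return "No"
--
-- def solve2(x: list[str], y: list[str]) -> bool:
--     assert len(x) == len(y)
--     xa_cnt = x.count("A")
--     ya_cnt = y.count("A")
--     remain = ya_cnt - xa_cnt
--     if remain < 0:
--         return False
--     for i in range(len(x)):
--         if remain > 0 and x[i] == "C":
--             x[i] = "A"
--             remain -= 1
--         elif x[i] == "C":
--             x[i] = "B"
--     acc_x = [0] * (len(x) + 1)
--     acc_y = [0] * (len(y) + 1)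
--     for i in range(len(x)):
--         acc_x[i + 1] = acc_x[i] + (x[i] == "A")
--         acc_y[i + 1] = acc_y[i] + (y[i] == "A")
--     for a, b in zip(acc_x, acc_y):
--         if b > a:
--             return False
--     return True
-- ===== SOURCE B (Python) =====
-- def seg_ok(seg):
--     remain = sum(y == "A" for _, y in seg) - sum(x == "A" for x, _ in seg)
--     if remain < 0:
--         return False
--     ax = ay = cx = 0
--     for x, y in seg:
--         ax += x == "A"
--         ay += y == "A"
--         cx += x == "C"
--         if ay > ax + min(remain, cx):
--             return False
--     return True
--
--
-- def solve(N, X, Y):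
--     seg = []
--     for x, y in zip(X, Y):
--         if y == "C":
--             if x != "C":
--                 return "No"
--             if seg:
--                 if not seg_ok(seg):
--                     return "No"
--                 seg = []
--         else:
--             seg.append((x, y))
--     if seg and not seg_ok(seg):
--         return "No"
--     return "Yes"
-- ===== Notes on version B (the rewrite author's own statement) =====
-- stated objective: simpler
-- what changed: Replaces A's two-pass scheme (materialize per-segment character lists, greedily mutate C's to A/B in place, build prefix-sum arrays and recheck) with a single main loop that checks each segment on the fly via the closed-form prefix test ay <= ax + min(remain, cx), with no mutation and no auxiliary arrays.
import Mathlib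
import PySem

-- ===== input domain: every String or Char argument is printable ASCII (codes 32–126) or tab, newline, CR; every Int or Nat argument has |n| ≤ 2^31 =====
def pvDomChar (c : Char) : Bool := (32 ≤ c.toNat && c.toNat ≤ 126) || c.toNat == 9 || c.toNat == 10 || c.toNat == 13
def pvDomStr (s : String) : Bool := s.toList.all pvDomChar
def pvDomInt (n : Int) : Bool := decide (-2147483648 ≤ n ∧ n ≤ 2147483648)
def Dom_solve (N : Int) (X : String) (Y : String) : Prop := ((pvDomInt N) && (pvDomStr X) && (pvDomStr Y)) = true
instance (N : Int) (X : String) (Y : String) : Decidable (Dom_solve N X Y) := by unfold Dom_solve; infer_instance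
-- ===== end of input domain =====

-- B replaces A's in-place greedy C→A mutation and prefix-array recheck with a single pass
-- and a closed-form per-segment prefix test (simpler; return value only, A mutates only locals).

-- ===== PORT A =====
-- first loop of A: returns true iff some pair has y == 'C' and x != 'C' (then A returns "No")
def guardA : List (Char × Char) → Bool
  | [] => false
  | (x, y) :: rest => if y = 'C' ∧ x ≠ 'C' then true else guardA rest

-- one step of A's segmentation loop; state = (XC, YC, tmp_x, tmp_y)
def segStep (st : List (List Char) × List (List Char) × List Char × List Char)
    (p : Char × Char) : List (List Char) × List (List Char) × List Char × List Char :=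
  match st with
  | (XC, YC, tx, ty) =>
    if p.2 = 'C' then
      if ty = [] then (XC, YC, tx, ty)
      else (XC ++ [tx], YC ++ [ty], ([] : List Char), ([] : List Char))
    else (XC, YC, tx ++ [p.1], ty ++ [p.2])

-- A's in-place conversion loop in solve2: C→A while remain > 0 (decrementing), else C→B
def conv : List Char → Int → List Char × Int
  | [], r => ([], r)
  | c :: rest, r =>
    if 0 < r ∧ c = 'C' then
      let p := conv rest (r - 1); ('A' :: p.1, p.2)
    else if c = 'C' then
      let p := conv rest r; ('B' :: p.1, p.2)
    else
      let p := conv rest r; (c :: p.1, p.2)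

-- one step of A's prefix-sum accumulation: acc[i+1] = acc[i] + (c == "A")
def stepA (a : Int) (c : Char) : Int := a + (if c = 'A' then 1 else 0)

def solve2 (x y : List Char) : Bool :=
  let remain : Int := (y.count 'A' : Int) - (x.count 'A' : Int)
  if remain < 0 then false
  else
    let x' := (conv x remain).1
    let accx := List.scanl stepA 0 x'
    let accy := List.scanl stepA 0 y
    (accx.zip accy).all (fun p => !(p.1 < p.2))

def solve (N : Int) (X : String) (Y : String) : String :=
  let ps := X.toList.zip Y.toList
  if guardA ps then "No"
  else
    let st := ps.foldl segStep ([], [], [], [])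
    let XC := if st.2.2.2 = [] then st.1 else st.1 ++ [st.2.2.1]
    let YC := if st.2.2.2 = [] then st.2.1 else st.2.1 ++ [st.2.2.2]
    if (XC.zip YC).all (fun p => solve2 p.1 p.2) then "Yes" else "No"

-- ===== PORT B =====
-- sum(y == "A" for _, y in seg)
def sumA2 : List (Char × Char) → Int
  | [] => 0
  | (_, y) :: t => (if y = 'A' then 1 else 0) + sumA2 t

-- sum(x == "A" for x, _ in seg)
def sumA1 : List (Char × Char) → Int
  | [] => 0
  | (x, _) :: t => (if x = 'A' then 1 else 0) + sumA1 t

-- B's per-segment loop: running ax, ay, cx; fail if ay > ax + min(remain, cx)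
def segLoop : List (Char × Char) → Int → Int → Int → Int → Bool
  | [], _, _, _, _ => true
  | (x, y) :: t, remain, ax, ay, cx =>
    let ax' := ax + (if x = 'A' then 1 else 0)
    let ay' := ay + (if y = 'A' then 1 else 0)
    let cx' := cx + (if x = 'C' then 1 else 0)
    if ax' + min remain cx' < ay' then false
    else segLoop t remain ax' ay' cx'

def segOk (seg : List (Char × Char)) : Bool :=
  let remain := sumA2 seg - sumA1 seg
  if remain < 0 then false
  else segLoop seg remain 0 0 0

-- B's single main loop; seg accumulates the current segment
def bRec : List (Char × Char) → List (Char × Char) → String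
  | [], seg => if seg = [] then "Yes" else if segOk seg then "Yes" else "No"
  | (x, y) :: t, seg =>
    if y = 'C' then
      if x ≠ 'C' then "No"
      else if seg = [] then bRec t seg
      else if segOk seg then bRec t [] else "No"
    else bRec t (seg ++ [(x, y)])

def solve_alt (N : Int) (X : String) (Y : String) : String :=
  bRec (X.toList.zip Y.toList) []

-- ===== PRECONDITION & SPEC =====
def Spec_solve (N : Int) (X : String) (Y : String) (out : String) : Prop := out = solve_alt N X Y
instance (N : Int) (X : String) (Y : String) (out : String) : Decidable (Spec_solve N X Y out) := by unfold Spec_solve; infer_instance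

-- ===== CLAIM (what is proved, stated in full; the proofs are below) =====
def Claim_equal_solve : Prop := ∀ (N : Int) (X : String) (Y : String), Dom_solve N X Y → Spec_solve N X Y (solve N X Y)

-- ===== LEMMAS AND PROOFS =====

-- tail of A after the guard, from state (tx, ty) with no finished segments yet
def gBool (ps : List (Char × Char)) (tx ty : List Char) : Bool :=
  let st := ps.foldl segStep ([], [], tx, ty)
  let XC := if st.2.2.2 = [] then st.1 else st.1 ++ [st.2.2.1]
  let YC := if st.2.2.2 = [] then st.2.1 else st.2.1 ++ [st.2.2.2]
  (XC.zip YC).all (fun p => solve2 p.1 p.2)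

-- the check loop of solve2 on the two scanl lists, fused
def chk2 : List Char → List Char → Int → Int → Bool
  | x :: xs, y :: ys, a, b =>
      (!(stepA a x < stepA b y)) && chk2 xs ys (stepA a x) (stepA b y)
  | _, _, _, _ => true

-- solve2's check on (conv x r).1, fused with conv
def mkF : List Char → List Char → Int → Int → Int → Bool
  | x :: xs, y :: ys, r, ax, ay =>
    let ay' := ay + (if y = 'A' then 1 else 0)
    if 0 < r ∧ x = 'C' then (!(ax + 1 < ay')) && mkF xs ys (r - 1) (ax + 1) ay'
    else if x = 'C' then (!(ax < ay')) && mkF xs ys r ax ay'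
    else
      let ax' := ax + (if x = 'A' then 1 else 0)
      (!(ax' < ay')) && mkF xs ys r ax' ay'
  | _, _, _, _, _ => true

theorem bRec_guard (ps : List (Char × Char)) (seg : List (Char × Char))
    (h : guardA ps = true) : bRec ps seg = "No" := by
  induction ps generalizing seg with
  | nil => simp [guardA] at h
  | cons p t ih =>
    obtain ⟨x, y⟩ := p
    simp only [guardA] at h
    by_cases hv : y = 'C' ∧ x ≠ 'C'
    · simp [bRec, hv.1, hv.2]
    · rw [if_neg hv] at h
      simp only [bRec]
      split_ifs <;> simp_all [ih _ h]


theorem fold_factor (ps : List (Char × Char)) (P Q : List (List Char)) (tx ty : List Char) :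
    ps.foldl segStep (P, Q, tx, ty) =
      (P ++ (ps.foldl segStep ([], [], tx, ty)).1,
       Q ++ (ps.foldl segStep ([], [], tx, ty)).2.1,
       (ps.foldl segStep ([], [], tx, ty)).2.2.1,
       (ps.foldl segStep ([], [], tx, ty)).2.2.2) := by
  induction ps generalizing P Q tx ty with
  | nil => simp
  | cons p t ih =>
    obtain ⟨x, y⟩ := p
    simp only [List.foldl_cons]
    by_cases hy : y = 'C'
    · by_cases hty : ty = []
      · have h1 : segStep (P, Q, tx, ty) (x, y) = (P, Q, tx, ty) := by
          simp [segStep, hy, hty]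
        have h2 : segStep (([] : List (List Char)), ([] : List (List Char)), tx, ty) (x, y) = ([], [], tx, ty) := by
          simp [segStep, hy, hty]
        rw [h1, h2, ih]
      · have h1 : segStep (P, Q, tx, ty) (x, y) = (P ++ [tx], Q ++ [ty], [], []) := by
          simp [segStep, hy, hty]
        have h2 : segStep (([] : List (List Char)), ([] : List (List Char)), tx, ty) (x, y) = ([tx], [ty], [], []) := by
          simp [segStep, hy, hty]
        rw [h1, h2, ih (P ++ [tx]) (Q ++ [ty]) [] [], ih [tx] [ty] [] []]
        simp
    · have h1 : segStep (P, Q, tx, ty) (x, y) = (P, Q, tx ++ [x], ty ++ [y]) := by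
        simp [segStep, hy]
      have h2 : segStep (([] : List (List Char)), ([] : List (List Char)), tx, ty) (x, y) = ([], [], tx ++ [x], ty ++ [y]) := by
        simp [segStep, hy]
      rw [h1, h2, ih]

theorem conv_length (xs : List Char) (r : Int) : ((conv xs r).1).length = xs.length := by
  induction xs generalizing r with
  | nil => simp [conv]
  | cons c rest ih => simp only [conv]; split_ifs <;> simp [ih]


theorem scanl_zip_all (xs : List Char) (ys : List Char) (a b : Int)
    (h : xs.length = ys.length) :
    (((List.scanl stepA a xs).zip (List.scanl stepA b ys)).all (fun p => !(p.1 < p.2)))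
      = ((!(a < b)) && chk2 xs ys a b) := by
  induction xs generalizing ys a b with
  | nil =>
    cases ys with
    | nil => simp [chk2]
    | cons y ys => simp at h
  | cons x xs ih =>
    cases ys with
    | nil => simp at h
    | cons y ys =>
      simp only [List.length_cons, Nat.add_right_cancel_iff] at h
      simp only [List.scanl_cons, List.zip_cons_cons, List.all_cons, chk2]
      rw [ih _ _ _ h]

theorem chk2_conv (xs ys : List Char) (r ax ay : Int) :
    chk2 ((conv xs r).1) ys ax ay = mkF xs ys r ax ay := by
  induction xs generalizing ys r ax ay with
  | nil => cases ys <;> simp [conv, chk2, mkF]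
  | cons x xs ih =>
    cases ys with
    | nil =>
      have : ∃ c l, (conv (x :: xs) r).1 = c :: l := by
        simp only [conv]; split_ifs <;> exact ⟨_, _, rfl⟩
      obtain ⟨c, l, hc⟩ := this
      simp [hc, chk2, mkF]
    | cons y ys =>
      simp only [conv, mkF]
      split_ifs <;> simp_all [chk2, stepA]

theorem mkF_segLoop (q : List (Char × Char)) (r cx ax ay : Int)
    (hr : 0 ≤ r) (hc : 0 ≤ cx) :
    mkF (q.map Prod.fst) (q.map Prod.snd) (r - min r cx) (ax + min r cx) ay
      = segLoop q r ax ay cx := by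
  induction q generalizing cx ax ay with
  | nil => simp [mkF, segLoop]
  | cons p t ih =>
    obtain ⟨x, y⟩ := p
    simp only [List.map_cons, mkF, segLoop]
    by_cases hx : x = 'C'
    · subst hx
      simp only [show (if ('C' : Char) = 'A' then (1 : Int) else 0) = 0 by decide,
        add_zero, and_true, if_true]
      by_cases hlt : cx < r
      · have e1 : min r cx = cx := by omega
        have e2 : min r (cx + 1) = cx + 1 := by omega
        rw [e1, e2]
        rw [if_pos (show (0 : Int) < r - cx by omega)]
        have h1 := ih (cx + 1) ax (ay + (if y = 'A' then (1 : Int) else 0)) (by omega)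
        rw [e2] at h1
        rw [show ax + cx + 1 = ax + (cx + 1) by ring, show r - cx - 1 = r - (cx + 1) by ring,
          h1]
        by_cases hb : ax + (cx + 1) < ay + (if y = 'A' then (1 : Int) else 0) <;> simp [hb]
      · have e1 : min r cx = r := by omega
        have e2 : min r (cx + 1) = r := by omega
        rw [e1, e2]
        rw [if_neg (show ¬ (0 : Int) < r - r by omega)]
        have h1 := ih (cx + 1) ax (ay + (if y = 'A' then (1 : Int) else 0)) (by omega)
        rw [e2] at h1
        rw [h1]
        by_cases hb : ax + r < ay + (if y = 'A' then (1 : Int) else 0) <;> simp [hb]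
    · simp only [hx, and_false, if_false, add_zero]
      have h1 := ih cx (ax + (if x = 'A' then (1 : Int) else 0))
        (ay + (if y = 'A' then (1 : Int) else 0)) hc
      rw [show ax + min r cx + (if x = 'A' then (1 : Int) else 0)
          = ax + (if x = 'A' then (1 : Int) else 0) + min r cx by ring, h1]
      by_cases hb : ax + (if x = 'A' then (1 : Int) else 0) + min r cx
          < ay + (if y = 'A' then (1 : Int) else 0) <;> simp [hb]

theorem sumA1_eq (q : List (Char × Char)) : sumA1 q = ((q.map Prod.fst).count 'A' : Int) := by
  induction q with
  | nil => simp [sumA1]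
  | cons p t ih =>
    obtain ⟨x, y⟩ := p
    simp only [sumA1, List.map_cons, List.count_cons, ih]
    by_cases hx : x = 'A' <;> simp [hx] <;> omega


theorem sumA2_eq (q : List (Char × Char)) : sumA2 q = ((q.map Prod.snd).count 'A' : Int) := by
  induction q with
  | nil => simp [sumA2]
  | cons p t ih =>
    obtain ⟨x, y⟩ := p
    simp only [sumA2, List.map_cons, List.count_cons, ih]
    by_cases hy : y = 'A' <;> simp [hy] <;> omega


theorem segment_lemma (tx ty : List Char) (h : tx.length = ty.length) :
    solve2 tx ty = segOk (tx.zip ty) := by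
  have hf : (tx.zip ty).map Prod.fst = tx := List.map_fst_zip (le_of_eq h)
  have hs : (tx.zip ty).map Prod.snd = ty := List.map_snd_zip (le_of_eq h.symm)
  simp only [solve2, segOk, sumA1_eq, sumA2_eq, hf, hs]
  by_cases hr : ((ty.count 'A' : Int) - (tx.count 'A' : Int)) < 0
  · simp [hr]
  · rw [if_neg hr, if_neg hr]
    rw [scanl_zip_all _ _ _ _ (by rw [conv_length]; exact h), chk2_conv]
    have hm := mkF_segLoop (tx.zip ty) ((ty.count 'A' : Int) - (tx.count 'A' : Int)) 0 0 0
      (by omega) le_rfl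
    rw [hf, hs] at hm
    have e0 : min ((ty.count 'A' : Int) - (tx.count 'A' : Int)) 0 = 0 := by omega
    rw [e0] at hm
    simp only [sub_zero, add_zero] at hm
    simp [hm]

theorem main_lemma (ps : List (Char × Char)) (tx ty : List Char)
    (hg : guardA ps = false) (h : tx.length = ty.length) :
    bRec ps (tx.zip ty) = (if gBool ps tx ty then "Yes" else "No") := by
  induction ps generalizing tx ty with
  | nil =>
    simp only [gBool, List.foldl_nil, bRec]
    by_cases hty : ty = []
    · have htx : tx = [] := by cases tx <;> cases ty <;> simp_all
      subst hty htx; simp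
    · have hzip : tx.zip ty ≠ [] := by cases tx <;> cases ty <;> simp_all
      rw [if_neg hzip, if_neg hty, if_neg hty]
      simp [segment_lemma tx ty h]
  | cons p t ih =>
    obtain ⟨x, y⟩ := p
    simp only [guardA] at hg
    have hv : ¬(y = 'C' ∧ x ≠ 'C') := by
      intro hv; rw [if_pos hv] at hg; exact Bool.true_eq_false.mp hg
    rw [if_neg hv] at hg
    by_cases hy : y = 'C'
    · have hx : x = 'C' := by by_contra hxx; exact hv ⟨hy, hxx⟩
      by_cases hty : ty = []
      · have htx : tx = [] := by cases tx <;> cases ty <;> simp_all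
        subst hty htx
        have hstep : segStep (([] : List (List Char)), ([] : List (List Char)),
            ([] : List Char), ([] : List Char)) (x, y) = ([], [], [], []) := by
          simp [segStep, hy]
        simp only [List.zip_nil_right, bRec, hy, hx, if_neg (by simp : ¬('C' : Char) ≠ 'C')]
        exact (ih [] [] hg rfl).trans (by rfl)
      · have hzip : tx.zip ty ≠ [] := by cases tx <;> cases ty <;> simp_all
        have hstep : segStep (([] : List (List Char)), ([] : List (List Char)), tx, ty) (x, y)
            = ([tx], [ty], [], []) := by simp [segStep, hy, hty]
        have key : gBool ((x, y) :: t) tx ty = (solve2 tx ty && gBool t [] []) := by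
          simp only [gBool, List.foldl_cons, hstep]
          rw [fold_factor t [tx] [ty] [] []]
          by_cases h4 : (List.foldl segStep ([], [], [], []) t).2.2.2 = [] <;>
            simp [h4, List.zip_cons_cons]
        rw [key]
        simp only [bRec, hy, hx, if_neg (by simp : ¬('C' : Char) ≠ 'C'), if_neg hzip]
        rw [← segment_lemma tx ty h]
        have hihe := ih [] [] hg rfl
        simp only [List.zip_nil_right] at hihe
        rw [hihe]
        cases hs2 : solve2 tx ty <;> cases hgb : gBool t [] [] <;> simp
    · have hstep : segStep (([] : List (List Char)), ([] : List (List Char)), tx, ty) (x, y)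
          = ([], [], tx ++ [x], ty ++ [y]) := by simp [segStep, hy]
      have hzip : (tx ++ [x]).zip (ty ++ [y]) = tx.zip ty ++ [(x, y)] := by
        rw [List.zip_append h]
        simp
      have hbr : bRec ((x, y) :: t) (tx.zip ty) = bRec t (tx.zip ty ++ [(x, y)]) := by
        simp [bRec, hy]
      rw [hbr, ← hzip, ih _ _ hg (by simp [h])]
      simp only [gBool, List.foldl_cons, hstep]
      rfl

-- ===== VERDICT (by name: the statement is the Claim_ definition above) =====
theorem solve_spec : Claim_equal_solve := by
  intro N X Y _
  unfold Spec_solve solve solve_alt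
  cases hg : guardA (X.toList.zip Y.toList) with
  | true => simp [hg, bRec_guard _ _ hg]
  | false =>
    have := main_lemma (X.toList.zip Y.toList) [] [] hg rfl
    simp only [List.zip_nil_right] at this
    simp [hg, this, gBool]
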